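-- pv_equiv track=rewrite | github.com/DanyaMr/YandexTraining8 | first_week/1_F.py | arr_sum_columns
-- ===== SOURCE A (Python) =====
-- def arr_sum_columns(arr, n, m):
--
--     arr_columns = list()
--     counter_minus = 0
--     counter_plus = 0
--     counter_question = 0
--     for i in range(m):
--         for j in range(n):
--             if arr[j][i] == '+':
--                 counter_plus += 1
--             elif arr[j][i] == '-':
--                 counter_minus += 1
--             else:
--                 counter_question += 1
--
--         current_sum = counter_plus - counter_question - counter_minus
--         counter_minus = 0
--         counter_plus = 0
--         counter_question = 0
--         arr_columns.append(current_sum)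
--
--     return arr_columns
-- ===== SOURCE B (Python) =====
-- def arr_sum_columns(arr, n, m):
--     # Row-major single pass: keep a vector of m running column scores and fold
--     # each row into it at once; every '+' cell adds 1, any other cell adds -1
--     # (since score = plus - minus - question).
--     sums = [0] * m
--     for row in arr[:n]:
--         sums = [s + (1 if c == '+' else -1) for s, c in zip(sums, row)]
--     return sums
-- ===== Notes on version B (the rewrite author's own statement) =====
-- stated objective: alternative
-- what changed: Replaces A's column-major double loop with three counters by a row-major fold that carries a length-m vector of running column scores, folding each row in with zip (+1 for '+', -1 otherwise); no per-column scan and no counters remain.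
-- outside the precondition, e.g. on arr_sum_columns([['+'], ['+']], -1, 1): A returns [0], B returns [1]
import Mathlib
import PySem

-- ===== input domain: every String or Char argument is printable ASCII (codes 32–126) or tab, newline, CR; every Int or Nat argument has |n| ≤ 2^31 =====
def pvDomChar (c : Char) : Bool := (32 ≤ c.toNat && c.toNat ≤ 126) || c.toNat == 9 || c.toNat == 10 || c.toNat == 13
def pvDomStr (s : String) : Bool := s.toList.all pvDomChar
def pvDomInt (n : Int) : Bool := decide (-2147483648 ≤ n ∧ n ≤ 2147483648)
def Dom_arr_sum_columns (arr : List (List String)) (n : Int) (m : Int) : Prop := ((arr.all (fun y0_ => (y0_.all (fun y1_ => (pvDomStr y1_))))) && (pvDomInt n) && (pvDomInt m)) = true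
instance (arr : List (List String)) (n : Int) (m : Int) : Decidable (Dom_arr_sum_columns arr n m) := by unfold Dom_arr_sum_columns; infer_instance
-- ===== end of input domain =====

-- B replaces A's column-major double loop (three counters per column) by a row-major fold
-- carrying a vector of m running column scores (alternative decomposition; same cost).

-- ===== PORT A =====
-- literal transliteration: outer loop over columns i, inner loop over rows j counting '+',
-- '-', else; then current_sum = counter_plus - counter_question - counter_minus, append.
-- state is (counter_minus, counter_plus, counter_question) in declaration order.
def arr_sum_columns (arr : List (List String)) (n : Int) (m : Int) : List Int :=
  (PySem.List.pyRange 0 m 1).foldl (fun arr_columns i =>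
    let c := (PySem.List.pyRange 0 n 1).foldl (fun (c : Int × Int × Int) j =>
      let cell := PySem.List.pyGetD (PySem.List.pyGetD arr j []) i ""   -- arr[j][i]; Pre_ keeps it in range
      if cell = "+" then (c.1, c.2.1 + 1, c.2.2)
      else if cell = "-" then (c.1 + 1, c.2.1, c.2.2)
      else (c.1, c.2.1, c.2.2 + 1)) (0, 0, 0)
    arr_columns ++ [c.2.1 - c.2.2 - c.1]) []

-- ===== PORT B =====
-- literal transliteration of Source B: sums = [0]*m, then for row in arr[:n] fold the row into
-- the vector: sums = [s + (1 if c == '+' else -1) for s, c in zip(sums, row)].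
def arr_sum_columns_alt (arr : List (List String)) (n : Int) (m : Int) : List Int :=
  (PySem.List.slice arr none (some n)).foldl
    (fun sums row => (sums.zip row).map (fun p => p.1 + if p.2 = "+" then (1 : Int) else -1))
    (List.replicate m.toNat 0)

-- ===== PRECONDITION & SPEC =====
-- Pre_ is the natural domain: when any column is requested (0 < m), the grid must have 0 ≤ n
-- rows each with at least m cells (else Python A raises IndexError); it also excludes n < 0
-- with 0 < m, where A returns a list of zeros only because its inner loop is empty — a
-- degenerate input outside the natural domain, on which B folds arr[:n] (all but the last
-- |n| rows) instead.
def Pre_arr_sum_columns (arr : List (List String)) (n : Int) (m : Int) : Prop :=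
  0 < m → 0 ≤ n ∧ n ≤ (arr.length : Int) ∧ ∀ row ∈ arr.take n.toNat, m ≤ (row.length : Int)
instance (arr : List (List String)) (n : Int) (m : Int) : Decidable (Pre_arr_sum_columns arr n m) := by unfold Pre_arr_sum_columns; infer_instance
def pvWitness_arr_sum_columns : List (List String) × Int × Int := ([["+", "-"], ["?", "+"]], 2, 2)
def Spec_arr_sum_columns (arr : List (List String)) (n : Int) (m : Int) (out : List Int) : Prop := out = arr_sum_columns_alt arr n m
instance (arr : List (List String)) (n : Int) (m : Int) (out : List Int) : Decidable (Spec_arr_sum_columns arr n m out) := by unfold Spec_arr_sum_columns; infer_instance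

-- ===== CLAIM (what is proved, stated in full; the proofs are below) =====
def Claim_equal_arr_sum_columns : Prop := ∀ (arr : List (List String)) (n : Int) (m : Int), Dom_arr_sum_columns arr n m → Pre_arr_sum_columns arr n m → Spec_arr_sum_columns arr n m (arr_sum_columns arr n m)

-- ===== LEMMAS AND PROOFS =====

-- A's inner loop: plus - question - minus over initial (a, b, c) equals the initial offset
-- plus the sum of per-cell contributions, +1 for '+' and -1 otherwise.
theorem col_counters (g : Int → String) (L : List Int) : ∀ (a b c : Int),
    (let F := L.foldl (fun (t : Int × Int × Int) j =>
        let cell := g j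
        if cell = "+" then (t.1, t.2.1 + 1, t.2.2)
        else if cell = "-" then (t.1 + 1, t.2.1, t.2.2)
        else (t.1, t.2.1, t.2.2 + 1)) (a, b, c)
     F.2.1 - F.2.2 - F.1) =
    (b - c - a) + (L.map (fun j => if g j = "+" then (1 : Int) else -1)).sum := by
  induction L with
  | nil => intro a b c; simp
  | cons j L ih =>
    intro a b c
    by_cases h1 : g j = "+"
    · simp only [List.foldl_cons, h1, reduceIte, List.map_cons, List.sum_cons]
      rw [ih]; ring
    · by_cases h2 : g j = "-"
      · simp only [List.foldl_cons, h2, reduceIte, List.map_cons, List.sum_cons]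
        rw [ih]; simp; ring
      · simp only [List.foldl_cons, h1, h2, reduceIte, List.map_cons, List.sum_cons]
        rw [ih]; ring

-- map over indices of a list's own range is the list itself (used for both rowfold base
-- case and the index/row bridge below)
theorem range_getD {α : Type} (v : List α) (d : α) : (List.range v.length).map (fun i => v.getD i d) = v := by
  apply List.ext_getElem
  · simp
  · intro i h1 h2
    simp [List.getD_eq_getElem?_getD, List.getElem?_eq_getElem h2]

-- B's row fold: folding rows (each at least as long as v) into the vector v gives, at each
-- index i, v[i] plus the sum of that column's per-row contributions.
theorem rowfold (rows : List (List String)) : ∀ (v : List Int),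
    (∀ row ∈ rows, v.length ≤ row.length) →
    rows.foldl (fun sums row => (sums.zip row).map (fun p => p.1 + if p.2 = "+" then (1 : Int) else -1)) v
      = (List.range v.length).map (fun i =>
          v.getD i 0 + (rows.map (fun row => if row.getD i "" = "+" then (1 : Int) else -1)).sum) := by
  induction rows with
  | nil =>
    intro v _
    simp only [List.foldl_nil, List.map_nil, List.sum_nil, add_zero]
    exact (range_getD v 0).symm
  | cons row rows ih =>
    intro v hlen
    have hrow : v.length ≤ row.length := hlen row (by simp)
    have hstep : ((v.zip row).map (fun p => p.1 + if p.2 = "+" then (1 : Int) else -1)).length = v.length := by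
      simp [Nat.min_eq_left hrow]
    rw [List.foldl_cons, ih _ (by intro r hr; rw [hstep]; exact hlen r (by simp [hr]))]
    rw [hstep]
    apply List.map_congr_left
    intro i hi
    have hiv : i < v.length := List.mem_range.mp hi
    have hir : i < row.length := lt_of_lt_of_le hiv hrow
    have hzi : i < (v.zip row).length := by simp [Nat.min_eq_left hrow, hiv]
    rw [List.getD_eq_getElem _ _ (by simpa using hzi), List.getElem_map, List.getElem_zip,
        List.map_cons, List.sum_cons,
        List.getD_eq_getElem v _ hiv, List.getD_eq_getElem row _ hir]
    ring

-- folding rows into the empty vector stays empty (the m ≤ 0 case of B)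
theorem rowfold_nil (rows : List (List String)) :
    rows.foldl (fun sums row => (sums.zip row).map (fun p => p.1 + if p.2 = "+" then (1 : Int) else -1)) ([] : List Int) = [] := by
  induction rows with
  | nil => rfl
  | cons row rows ih => simpa using ih

-- ===== VERDICT (by name: the statement is the Claim_ definition above) =====
theorem arr_sum_columns_spec : Claim_equal_arr_sum_columns := by
  intro arr n m _ hpre
  unfold Spec_arr_sum_columns arr_sum_columns arr_sum_columns_alt
  by_cases hm : 0 < m
  case neg =>
    rw [show PySem.List.pyRange 0 m 1 = [] from PySem.List.pyRange_one_eq_nil (by omega),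
        show m.toNat = 0 by omega]
    simpa using (rowfold_nil (PySem.List.slice arr none (some n))).symm
  obtain ⟨hn0, hnlen, hrows⟩ := hpre hm
  have hnt : n.toNat ≤ arr.length := by omega
  have hlt : (arr.take n.toNat).length = n.toNat := List.length_take_of_le hnt
  rw [PySem.List.foldl_append_singleton_eq_map, List.nil_append,
      PySem.List.slice_to _ hn0,
      rowfold (arr.take n.toNat) (List.replicate m.toNat 0)
        (by intro row hr; simp only [List.length_replicate]
            have := hrows row hr; omega)]
  rw [List.length_replicate]
  apply List.ext_getElem
  · simp [PySem.List.length_pyRange_one]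
  · intro k hk1 hk2
    have hkm : k < m.toNat := by simpa using hk2
    rw [List.getElem_map, List.getElem_map, PySem.List.getElem_pyRange_one, List.getElem_range,
        List.getD_replicate, zero_add, zero_add]
    rw [col_counters (fun j => PySem.List.pyGetD (PySem.List.pyGetD arr j []) (k : Int) "")
          (PySem.List.pyRange 0 n 1) 0 0 0]
    simp only [sub_zero, zero_add]
    congr 1
    -- both sides are the same list of per-row contributions for column k
    apply List.ext_getElem
    · rw [List.length_map, List.length_map, PySem.List.length_pyRange_one, hlt]; omega
    · intro j hj1 hj2
      have hjn : j < n.toNat := by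
        have := hj2; simp only [List.length_map, hlt] at this; exact this
      have hja : j < arr.length := lt_of_lt_of_le hjn hnt
      rw [List.getElem_map, List.getElem_map, PySem.List.getElem_pyRange_one, zero_add]
      have hrowt : (arr.take n.toNat)[j] = arr[j] := List.getElem_take ..
      have hmem : arr[j] ∈ arr.take n.toNat := by
        rw [← hrowt]; exact List.getElem_mem _
      rw [hrowt,
          show PySem.List.pyGetD arr (j : Nat) [] = arr[j] from by
            rw [PySem.List.pyGetD_natCast, List.getD_eq_getElem _ _ hja],
          show PySem.List.pyGetD (arr[j] : List String) (k : Nat) "" = (arr[j] : List String).getD k "" from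
            PySem.List.pyGetD_natCast _ _ _]
    all_goals omega
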